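-- pv_equiv track=rewrite | github.com/inderpal2406/python-practice-2022 | PYnative/04-string-exercises/ex03d_chars_from_2_different_strs.py | create_str_from_first_middle_last_chars
-- ===== SOURCE A (Python) =====
-- def create_str_from_first_middle_last_chars(fn_strlist):
--     """Function to create str of first, middle, last chars of each input str in strlist"""
--     fn_ansstr = ""
--     count = 1
--     while count <= 3:
--         if count == 1:
--             for eachstr in fn_strlist:
--                 fn_ansstr = fn_ansstr + eachstr[0]
--         elif count == 2:
--             for eachstr in fn_strlist:
--                 strlen = len(eachstr)
--                 midindex = strlen // 2
--                 fn_ansstr = fn_ansstr + eachstr[midindex]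
--         else:
--             for eachstr in fn_strlist:
--                 fn_ansstr = fn_ansstr + eachstr[-1]
--         count = count + 1
--     return fn_ansstr
-- ===== SOURCE B (Python) =====
-- def create_str_from_first_middle_last_chars(fn_strlist):
--     """Function to create str of first, middle, last chars of each input str in strlist"""
--     firsts = []
--     mids = []
--     lasts = []
--     for eachstr in fn_strlist:
--         firsts.append(eachstr[0])
--         mids.append(eachstr[len(eachstr) // 2])
--         lasts.append(eachstr[-1])
--     return "".join(firsts) + "".join(mids) + "".join(lasts)
-- ===== Notes on version B (the rewrite author's own statement) =====
-- stated objective: simpler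
-- what changed: Replaces the count-driven while loop with three sequential passes over the list by a single pass that collects first/middle/last characters into three buffers, joined once at the end.
import Mathlib
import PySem

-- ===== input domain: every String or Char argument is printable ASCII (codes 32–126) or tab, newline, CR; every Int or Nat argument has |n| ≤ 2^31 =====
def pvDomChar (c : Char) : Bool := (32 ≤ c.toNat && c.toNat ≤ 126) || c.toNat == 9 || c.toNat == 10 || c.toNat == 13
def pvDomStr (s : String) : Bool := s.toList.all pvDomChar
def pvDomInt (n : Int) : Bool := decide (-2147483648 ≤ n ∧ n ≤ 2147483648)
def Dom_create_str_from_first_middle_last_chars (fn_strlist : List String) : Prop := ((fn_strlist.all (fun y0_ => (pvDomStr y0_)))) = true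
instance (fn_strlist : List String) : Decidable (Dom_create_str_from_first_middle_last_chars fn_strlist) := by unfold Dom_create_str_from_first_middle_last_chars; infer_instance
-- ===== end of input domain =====

-- B replaces A's three sequential passes (driven by a while/count loop with repeated
-- string concatenation) by one pass filling three buffers joined at the end (objective: simpler).

-- ===== PORT A =====
-- A: while count <= 3, three for-loops each appending one character per string.
-- s[0], s[len(s)//2], s[-1] are ported with PySem.List.pyGetD over the code points;
-- Pre_ guarantees every string is nonempty, so the index is always in range.
def create_str_from_first_middle_last_chars (fn_strlist : List String) : String :=
  -- count == 1 pass
  let p1 := fn_strlist.foldl (fun acc s => acc ++ [PySem.List.pyGetD s.toList 0 ' ']) ([] : List Char)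
  -- count == 2 pass
  let p2 := fn_strlist.foldl
    (fun acc s =>
      let strlen : Int := PySem.Str.len s
      let midindex := PySem.Int.floordiv strlen 2
      acc ++ [PySem.List.pyGetD s.toList midindex ' ']) p1
  -- count == 3 pass
  let p3 := fn_strlist.foldl (fun acc s => acc ++ [PySem.List.pyGetD s.toList (-1) ' ']) p2
  String.mk p3

-- ===== PORT B =====
-- B: one loop over fn_strlist appending to three buffers, then join and concatenate.
def create_str_from_first_middle_last_chars_alt (fn_strlist : List String) : String :=
  let bufs := fn_strlist.foldl
    (fun (acc : List Char × List Char × List Char) s =>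
      let strlen : Int := PySem.Str.len s
      (acc.1 ++ [PySem.List.pyGetD s.toList 0 ' '],
       acc.2.1 ++ [PySem.List.pyGetD s.toList (PySem.Int.floordiv strlen 2) ' '],
       acc.2.2 ++ [PySem.List.pyGetD s.toList (-1) ' ']))
    (([] : List Char), ([] : List Char), ([] : List Char))
  String.mk (bufs.1 ++ bufs.2.1 ++ bufs.2.2)

-- ===== PRECONDITION & SPEC =====
-- A raises IndexError on any empty string in the list; Pre_ excludes exactly those inputs.
def Pre_create_str_from_first_middle_last_chars (fn_strlist : List String) : Prop :=
  ∀ s ∈ fn_strlist, s ≠ ""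
instance (fn_strlist : List String) : Decidable (Pre_create_str_from_first_middle_last_chars fn_strlist) := by unfold Pre_create_str_from_first_middle_last_chars; infer_instance
def pvWitness_create_str_from_first_middle_last_chars : List String := (["abc", "hello", "x"])

def Spec_create_str_from_first_middle_last_chars (fn_strlist : List String) (out : String) : Prop := out = create_str_from_first_middle_last_chars_alt fn_strlist
instance (fn_strlist : List String) (out : String) : Decidable (Spec_create_str_from_first_middle_last_chars fn_strlist out) := by unfold Spec_create_str_from_first_middle_last_chars; infer_instance

-- ===== CLAIM (what is proved, stated in full; the proofs are below) =====
def Claim_equal_create_str_from_first_middle_last_chars : Prop := ∀ (fn_strlist : List String), Dom_create_str_from_first_middle_last_chars fn_strlist → Pre_create_str_from_first_middle_last_chars fn_strlist → Spec_create_str_from_first_middle_last_chars fn_strlist (create_str_from_first_middle_last_chars fn_strlist)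

-- ===== LEMMAS AND PROOFS =====

-- each of A's passes is 'init ++ map f'
theorem pvFoldAppendMap {α β : Type} (f : α → β) (xs : List α) (init : List β) :
    xs.foldl (fun acc s => acc ++ [f s]) init = init ++ xs.map f := by
  induction xs generalizing init with
  | nil => simp
  | cons x xs ih => simp [List.foldl, ih]

-- B's single pass computes the three maps at once
theorem pvFoldTriple {α β : Type} (f g h : α → β) (xs : List α) (a b c : List β) :
    xs.foldl (fun (acc : List β × List β × List β) s =>
        (acc.1 ++ [f s], acc.2.1 ++ [g s], acc.2.2 ++ [h s])) (a, b, c)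
      = (a ++ xs.map f, b ++ xs.map g, c ++ xs.map h) := by
  induction xs generalizing a b c with
  | nil => simp
  | cons x xs ih => simp [List.foldl, ih]

-- ===== VERDICT (by name: the statement is the Claim_ definition above) =====
theorem create_str_from_first_middle_last_chars_spec : Claim_equal_create_str_from_first_middle_last_chars := by
  intro l _ _
  unfold Spec_create_str_from_first_middle_last_chars
  unfold create_str_from_first_middle_last_chars create_str_from_first_middle_last_chars_alt
  simp only [pvFoldAppendMap, pvFoldTriple, List.nil_append, List.append_assoc]
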